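-- pv_equiv track=rewrite | github.com/BCM-HGSC/SMaHT_MIMS | asm_stats/asm_stats.py | read_fasta
-- ===== SOURCE A (Python) =====
-- def read_fasta(stdin):
--     name = None
--     cur_len = 0
--     seq_lines = []
--     for line in stdin:
--         line = line.strip()
--         if not line:
--             continue
--         if line.startswith(">"):
--             if name:
--                 yield name, cur_len
--             name = line[1:].split()[0]
--             cur_len = 0
--         else:
--             cur_len += len(line)
--     if name:
--         yield name, cur_len
-- ===== SOURCE B (Python) =====
-- def read_fasta(stdin):
--     # Chunk-based rewrite: strip/filter once, skip lines before the first
--     # header, then repeatedly split off one header + its run of sequence lines.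
--     clean = [s for s in (line.strip() for line in stdin) if s]
--     start = next((k for k, l in enumerate(clean) if l.startswith(">")), len(clean))
--     chunk = clean[start:]
--     while chunk:
--         header, tail = chunk[0], chunk[1:]
--         j = next((k for k, l in enumerate(tail) if l.startswith(">")), len(tail))
--         yield header[1:].split()[0], sum(len(l) for l in tail[:j])
--         chunk = tail[j:]
-- ===== Notes on version B (the rewrite author's own statement) =====
-- stated objective: alternative
-- what changed: Replaced A's single stateful pass (pending-name/length accumulator with a deferred final yield) by a strip-and-filter preprocessing pass followed by chunking: skip lines before the first header, then repeatedly split off one header and its run of sequence lines and yield the record directly.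
import Mathlib
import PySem

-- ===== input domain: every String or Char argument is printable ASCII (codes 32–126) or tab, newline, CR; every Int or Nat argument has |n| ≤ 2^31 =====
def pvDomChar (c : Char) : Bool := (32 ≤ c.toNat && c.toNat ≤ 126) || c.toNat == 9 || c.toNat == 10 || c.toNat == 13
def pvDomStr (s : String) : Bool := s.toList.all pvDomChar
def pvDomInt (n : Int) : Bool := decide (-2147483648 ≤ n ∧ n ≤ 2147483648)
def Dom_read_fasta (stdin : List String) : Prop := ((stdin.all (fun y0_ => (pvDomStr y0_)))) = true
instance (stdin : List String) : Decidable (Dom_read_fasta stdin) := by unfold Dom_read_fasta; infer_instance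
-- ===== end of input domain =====

-- B rewrites A's stateful single pass as strip/filter preprocessing plus chunking at header
-- lines (objective: alternative decomposition, same cost). Return-value equivalence only.

-- ===== PORT A =====
-- name is Option String (None sentinel); Python's `if name:` is `name.getD "" ≠ ""`.
-- line[1:].split()[0] : the [0] is `.headD ""`; the IndexError case (empty split) is excluded by Pre_.
def pvStepA (st : Option String × Int × List (String × Int)) (line : String) :
    Option String × Int × List (String × Int) :=
  let (name, cur_len, out) := st
  let line := PySem.Str.strip line
  if line = "" then (name, cur_len, out)
  else if PySem.Str.startswith line ">" then
    let out := if name.getD "" ≠ "" then out ++ [(name.getD "", cur_len)] else out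
    (some ((PySem.Str.split₀ (PySem.Str.slice line (some 1) none)).headD ""), 0, out)
  else (name, cur_len + (PySem.Str.len line : Int), out)

def read_fasta (stdin : List String) : List (String × Int) :=
  let st := stdin.foldl pvStepA (none, 0, [])
  let (name, cur_len, out) := st
  if name.getD "" ≠ "" then out ++ [(name.getD "", cur_len)] else out

-- ===== PORT B =====
def pvIsHeader (l : String) : Bool := PySem.Str.startswith l ">"

def pvNameOf (l : String) : String :=
  (PySem.Str.split₀ (PySem.Str.slice l (some 1) none)).headD ""

def pvSeqSum (ls : List String) : Int := (ls.map (fun l => (PySem.Str.len l : Int))).sum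

-- the while loop of Source B: one header + its run of sequence lines per iteration
def pvChunks : List String → List (String × Int)
  | [] => []
  | h :: tail =>
    let seq := tail.takeWhile (fun l => !pvIsHeader l)
    (pvNameOf h, pvSeqSum seq) :: pvChunks (tail.dropWhile (fun l => !pvIsHeader l))
termination_by ls => ls.length
decreasing_by
  simp only [List.length_cons]
  exact Nat.lt_succ_of_le (List.length_dropWhile_le _ _)

def read_fasta_alt (stdin : List String) : List (String × Int) :=
  let clean := (stdin.map PySem.Str.strip).filter (fun l => l ≠ "")
  pvChunks (clean.dropWhile (fun l => !pvIsHeader l))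

-- ===== PRECONDITION & SPEC =====
-- Pre_ excludes inputs containing a header line with no name token after '>' (a bare '>'),
-- on which the Python A (and B alike) raises IndexError at `line[1:].split()[0]`.
def Pre_read_fasta (stdin : List String) : Prop :=
  ∀ l ∈ stdin, PySem.Str.startswith (PySem.Str.strip l) ">" = true →
    (PySem.Str.split₀ (PySem.Str.slice (PySem.Str.strip l) (some 1) none)).headD "" ≠ ""
instance (stdin : List String) : Decidable (Pre_read_fasta stdin) := by
  unfold Pre_read_fasta; infer_instance

def pvWitness_read_fasta : List String := [">a", "CCGT", "  ", ">b extra", "TT", ">c"]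

def Spec_read_fasta (stdin : List String) (out : List (String × Int)) : Prop := out = read_fasta_alt stdin
instance (stdin : List String) (out : List (String × Int)) : Decidable (Spec_read_fasta stdin out) := by unfold Spec_read_fasta; infer_instance

-- ===== CLAIM (what is proved, stated in full; the proofs are below) =====
def Claim_equal_read_fasta : Prop := ∀ (stdin : List String), Dom_read_fasta stdin → Pre_read_fasta stdin → Spec_read_fasta stdin (read_fasta stdin)

-- ===== LEMMAS AND PROOFS =====

-- the final `if name: yield name, cur_len` of A
def pvFinish (st : Option String × Int × List (String × Int)) : List (String × Int) :=
  let (name, cur_len, out) := st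
  if name.getD "" ≠ "" then out ++ [(name.getD "", cur_len)] else out

-- pvStepA restricted to already-stripped nonempty lines
def pvStepC (st : Option String × Int × List (String × Int)) (l : String) :
    Option String × Int × List (String × Int) :=
  let (name, cur_len, out) := st
  if pvIsHeader l then
    let out := if name.getD "" ≠ "" then out ++ [(name.getD "", cur_len)] else out
    (some (pvNameOf l), 0, out)
  else (name, cur_len + (PySem.Str.len l : Int), out)

lemma pvStepA_eq (st : Option String × Int × List (String × Int)) (l : String) :
    pvStepA st l = if PySem.Str.strip l = "" then st else pvStepC st (PySem.Str.strip l) := by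
  obtain ⟨n, c, o⟩ := st
  by_cases h : PySem.Str.strip l = ""
  · simp [pvStepA, h]
  · simp only [pvStepA, pvStepC, pvIsHeader, pvNameOf, h, if_false]

lemma pvChunks_nil : pvChunks [] = [] := by simp [pvChunks]

lemma pvChunks_cons_header (h : String) (tail : List String) :
    pvChunks (h :: tail)
      = (pvNameOf h, pvSeqSum (tail.takeWhile (fun l => !pvIsHeader l)))
          :: pvChunks (tail.dropWhile (fun l => !pvIsHeader l)) := by
  simp [pvChunks]

lemma pvFold_clean (stdin : List String) (st : Option String × Int × List (String × Int)) :
    stdin.foldl pvStepA st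
      = ((stdin.map PySem.Str.strip).filter (fun l => l ≠ "")).foldl pvStepC st := by
  induction stdin generalizing st with
  | nil => rfl
  | cons l ls ih =>
    simp only [List.foldl_cons, List.map_cons, List.filter_cons]
    rw [pvStepA_eq]
    by_cases h : PySem.Str.strip l = "" <;> simp [h, ih]

-- clean lines all satisfy this (from Pre_): a header's name is nonempty
def pvGood (ls : List String) : Prop := ∀ l ∈ ls, pvIsHeader l = true → pvNameOf l ≠ ""

lemma pvGood_tail {l : String} {ls : List String} (h : pvGood (l :: ls)) : pvGood ls :=
  fun x hx => h x (List.mem_cons_of_mem _ hx)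

-- active phase: a header name n is pending with cur accumulated
lemma pvFold_active (ls : List String) (hg : pvGood ls) (n : String) (hn : n ≠ "")
    (cur : Int) (out : List (String × Int)) :
    pvFinish (ls.foldl pvStepC (some n, cur, out))
      = out ++ (n, cur + pvSeqSum (ls.takeWhile (fun l => !pvIsHeader l)))
            :: pvChunks (ls.dropWhile (fun l => !pvIsHeader l)) := by
  induction ls generalizing n cur out with
  | nil => simp [pvFinish, pvSeqSum, pvChunks_nil, hn]
  | cons c cs ih =>
    by_cases hc : pvIsHeader c = true
    · have hnc : pvNameOf c ≠ "" := hg c (List.mem_cons_self) hc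
      simp only [List.foldl_cons, pvStepC, hc, Option.getD_some, if_true,
        List.takeWhile_cons, List.dropWhile_cons]
      rw [if_pos hn, ih (pvGood_tail hg) _ hnc 0 _]
      simp [pvChunks_cons_header, pvSeqSum]
    · simp only [List.foldl_cons, pvStepC, hc, List.takeWhile_cons, List.dropWhile_cons]
      rw [if_neg (by simp), ih (pvGood_tail hg) n hn]
      simp [pvSeqSum, add_assoc]

-- skip phase: no header seen yet (name is None)
lemma pvFold_skip (ls : List String) (hg : pvGood ls) (cur : Int) (out : List (String × Int)) :
    pvFinish (ls.foldl pvStepC (none, cur, out))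
      = out ++ pvChunks (ls.dropWhile (fun l => !pvIsHeader l)) := by
  induction ls generalizing cur with
  | nil => simp [pvFinish, pvChunks_nil]
  | cons c cs ih =>
    by_cases hc : pvIsHeader c = true
    · have hnc : pvNameOf c ≠ "" := hg c (List.mem_cons_self) hc
      simp only [List.foldl_cons, pvStepC, hc, if_true, Option.getD_none, List.dropWhile_cons]
      rw [if_neg (by simp), pvFold_active cs (pvGood_tail hg) _ hnc]
      simp [pvChunks_cons_header]
    · simp only [List.foldl_cons, pvStepC, hc, List.dropWhile_cons]
      rw [if_neg (by simp), ih (pvGood_tail hg)]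
      simp

-- ===== VERDICT (by name: the statement is the Claim_ definition above) =====
theorem read_fasta_spec : Claim_equal_read_fasta := by
  intro stdin _ hpre
  unfold Spec_read_fasta read_fasta read_fasta_alt
  have hg : pvGood ((stdin.map PySem.Str.strip).filter (fun l => l ≠ "")) := by
    intro l hl hh
    simp only [List.mem_filter, List.mem_map] at hl
    obtain ⟨⟨x, hx, rfl⟩, -⟩ := hl
    exact hpre x hx (by simpa [pvIsHeader] using hh)
  have := pvFold_skip ((stdin.map PySem.Str.strip).filter (fun l => l ≠ "")) hg 0 []
  rw [pvFold_clean] at *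
  simpa [pvFinish] using this
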